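-- pv_equiv track=rewrite | github.com/navjot2130/prepAI | app.py | parse_gemini_output
-- ===== SOURCE A (Python) =====
-- def parse_gemini_output(text, total_questions):
--     sections = ["Technical", "HR", "Scenario-Based", "Aptitude"]
--     result = {sec: [] for sec in sections}
--     current_section = None
--     question, answer = "", ""
--
--     for line in text.splitlines():
--         line = line.strip()
--         if not line: continue
--
--         if any(line.lower().startswith(sec.lower()) for sec in sections):
--             if question and current_section:
--                 result[current_section].append((question.strip(), answer.strip()))
--             question, answer = "", ""
--             for sec in sections:
--                 if line.lower().startswith(sec.lower()):
--                     current_section = sec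
--                     break
--             continue
--
--         if line.lower().startswith("q") and ":" in line:
--             if question and current_section:
--                 result[current_section].append((question.strip(), answer.strip()))
--             question = line.split(":", 1)[1].strip()
--             answer = ""
--             continue
--
--         if line.lower().startswith("answer") and ":" in line:
--             answer = line.split(":", 1)[1].strip()
--             continue
--
--         if answer:
--             answer += " " + line
--         elif question:
--             question += " " + line
--
--     if question and current_section:
--         result[current_section].append((question.strip(), answer.strip()))
--
--     per_section = total_questions // len(sections)
--     remainder = total_questions % len(sections)
--
--     for i, sec in enumerate(sections):
--         expected = per_section + (1 if i == len(sections) - 1 and remainder else 0)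
--         result[sec] = result[sec][:expected]
--         while len(result[sec]) < expected:
--             result[sec].append(("No question generated", "No answer generated"))
--
--     return result
-- ===== SOURCE B (Python) =====
-- SECTIONS = ["Technical", "HR", "Scenario-Based", "Aptitude"]
-- PAD = ("No question generated", "No answer generated")
--
--
-- def _header_of(line):
--     low = line.lower()
--     for sec in SECTIONS:
--         if low.startswith(sec.lower()):
--             return sec
--     return None
--
--
-- def _parse_block(lines):
--     """Parse the lines of one section block into (question, answer) pairs."""
--     question, answer, pairs = "", "", []
--     for line in lines:
--         if line.lower().startswith("q") and ":" in line:
--             if question: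
--                 pairs.append((question.strip(), answer.strip()))
--             question = line.split(":", 1)[1].strip()
--             answer = ""
--         elif line.lower().startswith("answer") and ":" in line:
--             answer = line.split(":", 1)[1].strip()
--         elif answer:
--             answer += " " + line
--         elif question:
--             question += " " + line
--     if question:
--         pairs.append((question.strip(), answer.strip()))
--     return pairs
--
--
-- def parse_gemini_output(text, total_questions):
--     lines = [l.strip() for l in text.splitlines() if l.strip()]
--     # First pass: group lines into blocks; a header line opens a new block.
--     blocks = []
--     tag, cur = None, []
--     for line in lines:
--         sec = _header_of(line)
--         if sec is not None:
--             blocks.append((tag, cur))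
--             tag, cur = sec, []
--         else:
--             cur.append(line)
--     blocks.append((tag, cur))
--     # Second pass: parse each tagged block into (section, pair) events.
--     qa = [(t, p) for (t, ls) in blocks if t is not None for p in _parse_block(ls)]
--     per, rem = divmod(total_questions, len(SECTIONS))
--
--     def fit(pairs, expected):
--         pairs = pairs[:expected]
--         return pairs + [PAD] * (expected - len(pairs))
--
--     return {sec: fit([p for (t, p) in qa if t == sec],
--                      per + (1 if i == len(SECTIONS) - 1 and rem else 0))
--             for i, sec in enumerate(SECTIONS)}
-- ===== Notes on version B (the rewrite author's own statement) =====
-- stated objective: alternative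
-- what changed: A is a single-pass state machine threading (current_section, question, answer) and a result dict through every line; B first groups the stripped non-empty lines into section-tagged blocks, then parses each block independently into (question, answer) pairs, filters the flat (section, pair) event list per section, and fits each section list with slicing plus list-multiplication padding instead of A's while-append loop.
import Mathlib
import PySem

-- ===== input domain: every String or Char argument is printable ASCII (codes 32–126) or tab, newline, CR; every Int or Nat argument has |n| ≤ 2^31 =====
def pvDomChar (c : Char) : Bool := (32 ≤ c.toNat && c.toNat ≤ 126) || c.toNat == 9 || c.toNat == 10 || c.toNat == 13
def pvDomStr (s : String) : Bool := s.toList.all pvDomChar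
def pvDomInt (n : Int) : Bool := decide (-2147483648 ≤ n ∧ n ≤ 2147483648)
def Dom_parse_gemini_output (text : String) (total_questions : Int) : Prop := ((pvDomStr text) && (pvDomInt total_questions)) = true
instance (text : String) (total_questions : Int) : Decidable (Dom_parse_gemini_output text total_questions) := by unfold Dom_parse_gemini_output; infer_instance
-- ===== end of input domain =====

-- B regroups A's one-pass Q&A state machine into two passes (header-tagged blocks, then per-block pair
-- parsing and per-section filtering); alternative decomposition, same cost, same return value.

-- shared literal constants and the shared primitive `line.split(":", 1)[1]` (callers guard ":" in line)
def pvSections : List String := ["Technical", "HR", "Scenario-Based", "Aptitude"]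
def pvPad : String × String := ("No question generated", "No answer generated")
def pvAfterColon (line : String) : String :=
  (((PySem.Str.splitMax? line ":" 1).getD []).getD 1 "")
-- first section whose lowercased name prefixes the lowercased line (A's for/break scan, B's helper)
def pvHeaderOf (line : String) : Option String :=
  pvSections.find? (fun sec => PySem.Str.startswith (PySem.Str.lower line) (PySem.Str.lower sec))

-- ===== PORT A =====
abbrev pvRes := PySem.Dict String (List (String × String))

-- `if question and current_section: result[current_section].append(...)` (A repeats this block three times)
def pvFlushA (res : pvRes) (cur : Option String) (q a : String) : pvRes :=
  match cur with
  | some s => if q = "" then res else res.modify s [] (fun l => l ++ [(PySem.Str.strip q, PySem.Str.strip a)])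
  | none => res

-- the loop body on the stripped, non-empty line
def pvCoreA (st : pvRes × Option String × String × String) (line : String) :
    pvRes × Option String × String × String :=
  let (res, cur, q, a) := st
  if pvSections.any (fun sec => PySem.Str.startswith (PySem.Str.lower line) (PySem.Str.lower sec)) then
    let res := pvFlushA res cur q a
    let cur := match pvHeaderOf line with | some s => some s | none => cur
    (res, cur, "", "")
  else if PySem.Str.startswith (PySem.Str.lower line) "q" && PySem.Str.isIn ":" line then
    (pvFlushA res cur q a, cur, PySem.Str.strip (pvAfterColon line), "")
  else if PySem.Str.startswith (PySem.Str.lower line) "answer" && PySem.Str.isIn ":" line then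
    (res, cur, q, PySem.Str.strip (pvAfterColon line))
  else if a ≠ "" then (res, cur, q, a ++ " " ++ line)
  else if q ≠ "" then (res, cur, q ++ " " ++ line, a)
  else (res, cur, q, a)

def pvAStep (st : pvRes × Option String × String × String) (raw : String) :
    pvRes × Option String × String × String :=
  let line := PySem.Str.strip raw
  if line = "" then st else pvCoreA st line

-- `while len(result[sec]) < expected: result[sec].append(pvPad)`
def pvPadLoop (xs : List (String × String)) (expected : Int) : List (String × String) :=
  if (xs.length : Int) < expected then pvPadLoop (xs ++ [pvPad]) expected else xs
termination_by (expected - (xs.length : Int)).toNat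
decreasing_by simp; omega

def parse_gemini_output (text : String) (total_questions : Int) : List (String × List (String × String)) :=
  let result : pvRes := pvSections.foldl (fun d sec => d.insert sec []) PySem.Dict.empty
  let st := (PySem.Str.splitlines text).foldl pvAStep (result, (none : Option String), "", "")
  let result := pvFlushA st.1 st.2.1 st.2.2.1 st.2.2.2
  let per := PySem.Int.floordiv total_questions (pvSections.length : Int)
  let rem := PySem.Int.mod total_questions (pvSections.length : Int)
  let result := (PySem.List.enumerate pvSections).foldl (fun (result : pvRes) (p : Int × String) =>
      let expected := per + (if p.1 = (pvSections.length : Int) - 1 ∧ rem ≠ 0 then 1 else 0)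
      let truncated := PySem.List.slice (result.getD p.2 []) none (some expected)
      result.insert p.2 (pvPadLoop truncated expected)) result
  result.items

-- ===== PORT B =====
-- per-block Q/A pair parser (B's _parse_block loop body)
def pvBParseStep (st : String × String × List (String × String)) (line : String) :
    String × String × List (String × String) :=
  let (q, a, pairs) := st
  if PySem.Str.startswith (PySem.Str.lower line) "q" && PySem.Str.isIn ":" line then
    (PySem.Str.strip (pvAfterColon line), "",
     pairs ++ (if q = "" then [] else [(PySem.Str.strip q, PySem.Str.strip a)]))
  else if PySem.Str.startswith (PySem.Str.lower line) "answer" && PySem.Str.isIn ":" line then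
    (q, PySem.Str.strip (pvAfterColon line), pairs)
  else if a ≠ "" then (q, a ++ " " ++ line, pairs)
  else if q ≠ "" then (q ++ " " ++ line, a, pairs)
  else (q, a, pairs)

def pvParseBlock (lines : List String) : List (String × String) :=
  let st := lines.foldl pvBParseStep ("", "", [])
  st.2.2 ++ (if st.1 = "" then [] else [(PySem.Str.strip st.1, PySem.Str.strip st.2.1)])

-- first pass: group lines into (tag, lines) blocks
def pvBlockStep (st : List (Option String × List String) × Option String × List String) (line : String) :
    List (Option String × List String) × Option String × List String :=
  let (blocks, tag, cur) := st
  match pvHeaderOf line with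
  | some sec => (blocks ++ [(tag, cur)], some sec, ([] : List String))
  | none => (blocks, tag, cur ++ [line])

-- pairs[:expected] + [PAD] * (expected - len(...))
def pvFit (pairs : List (String × String)) (expected : Int) : List (String × String) :=
  let t := PySem.List.slice pairs none (some expected)
  t ++ List.replicate ((expected - (t.length : Int)).toNat) pvPad

def parse_gemini_output_alt (text : String) (total_questions : Int) : List (String × List (String × String)) :=
  let lines := ((PySem.Str.splitlines text).map PySem.Str.strip).filter (fun l => l != "")
  let st := lines.foldl pvBlockStep ([], none, [])
  let blocks := st.1 ++ [(st.2.1, st.2.2)]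
  let qa := blocks.flatMap (fun b => match b.1 with
    | some t => (pvParseBlock b.2).map (fun p => (t, p))
    | none => [])
  let per := PySem.Int.floordiv total_questions (pvSections.length : Int)
  let rem := PySem.Int.mod total_questions (pvSections.length : Int)
  (PySem.List.enumerate pvSections).map (fun p =>
    (p.2, pvFit ((qa.filter (fun tp => tp.1 == p.2)).map (·.2))
          (per + (if p.1 = (pvSections.length : Int) - 1 ∧ rem ≠ 0 then 1 else 0))))

-- ===== PRECONDITION & SPEC =====
def Spec_parse_gemini_output (text : String) (total_questions : Int) (out : List (String × List (String × String))) : Prop := out = parse_gemini_output_alt text total_questions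
instance (text : String) (total_questions : Int) (out : List (String × List (String × String))) : Decidable (Spec_parse_gemini_output text total_questions out) := by unfold Spec_parse_gemini_output; infer_instance

-- ===== CLAIM (what is proved, stated in full; the proofs are below) =====
def Claim_equal_parse_gemini_output : Prop := ∀ (text : String) (total_questions : Int), Dom_parse_gemini_output text total_questions → Spec_parse_gemini_output text total_questions (parse_gemini_output text total_questions)

-- ===== LEMMAS AND PROOFS =====

-- reference splitter: lines before the first header, and header-tagged segments after it
def pvSeg : List String → List String × List (String × List String)
  | [] => ([], [])
  | l :: ls =>
    match pvHeaderOf l with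
    | some s => ([], (s, (pvSeg ls).1) :: (pvSeg ls).2)
    | none => (l :: (pvSeg ls).1, (pvSeg ls).2)

-- block parse started from pending (q, a)
def pvBPFrom (q a : String) (ls : List String) : List (String × String) :=
  let st := ls.foldl pvBParseStep (q, a, [])
  st.2.2 ++ (if st.1 = "" then [] else [(PySem.Str.strip st.1, PySem.Str.strip st.2.1)])

def pvSecPairs (sec : String) (cur : Option String) (q a : String) (ls : List String) : List (String × String) :=
  (if cur = some sec then pvBPFrom q a (pvSeg ls).1 else []) ++
  ((pvSeg ls).2.flatMap (fun b => if b.1 = sec then pvBPFrom "" "" b.2 else []))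

lemma pvStrip_fold (raws : List String) (st : pvRes × Option String × String × String) :
    raws.foldl pvAStep st
      = (((raws.map PySem.Str.strip).filter (fun l => l != "")).foldl pvCoreA st) := by
  induction raws generalizing st with
  | nil => rfl
  | cons r raws ih =>
      by_cases h : PySem.Str.strip r = ""
      · simp [pvAStep, h, ih]
      · simp [pvAStep, h, ih]

lemma pvBP_step_acc (q a : String) (acc : List (String × String)) (l : String) :
    pvBParseStep (q, a, acc) l
      = ((pvBParseStep (q, a, []) l).1, (pvBParseStep (q, a, []) l).2.1,
         acc ++ (pvBParseStep (q, a, []) l).2.2) := by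
  simp only [pvBParseStep]
  split_ifs <;> simp

lemma pvBP_acc (ls : List String) (q a : String) (acc : List (String × String)) :
    ls.foldl pvBParseStep (q, a, acc)
      = ((ls.foldl pvBParseStep (q, a, [])).1, (ls.foldl pvBParseStep (q, a, [])).2.1,
         acc ++ (ls.foldl pvBParseStep (q, a, [])).2.2) := by
  induction ls generalizing q a acc with
  | nil => simp
  | cons l ls ih =>
      simp only [List.foldl_cons]
      rw [pvBP_step_acc]
      rw [ih]
      conv_rhs => rw [pvBP_step_acc, ih]
      simp

lemma pvBP_cons (q a : String) (l : String) (ls : List String) :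
    pvBPFrom q a (l :: ls)
      = (pvBParseStep (q, a, []) l).2.2
        ++ pvBPFrom (pvBParseStep (q, a, []) l).1 (pvBParseStep (q, a, []) l).2.1 ls := by
  have h := pvBP_acc ls (pvBParseStep (q, a, []) l).1 (pvBParseStep (q, a, []) l).2.1
    (pvBParseStep (q, a, []) l).2.2
  simp only [Prod.mk.eta] at h
  simp only [pvBPFrom, List.foldl_cons]
  rw [h]
  simp

lemma pvFlush_getD (res : pvRes) (cur : Option String) (q a sec : String) :
    (pvFlushA res cur q a).getD sec []
      = res.getD sec [] ++ (if cur = some sec then pvBPFrom q a [] else []) := by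
  cases cur with
  | none => simp [pvFlushA]
  | some s =>
      by_cases hq : q = ""
      · simp [pvFlushA, hq, pvBPFrom]
      · by_cases hs : s = sec
        · subst hs
          simp [pvFlushA, hq, pvBPFrom]
        · simp [pvFlushA, hq, PySem.Dict.getD_modify, hs, Ne.symm hs]

lemma pvA1 (ls : List String) (res : pvRes) (cur : Option String) (q a sec : String) :
    (pvFlushA (ls.foldl pvCoreA (res, cur, q, a)).1 (ls.foldl pvCoreA (res, cur, q, a)).2.1
        (ls.foldl pvCoreA (res, cur, q, a)).2.2.1 (ls.foldl pvCoreA (res, cur, q, a)).2.2.2).getD sec []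
      = res.getD sec [] ++ pvSecPairs sec cur q a ls := by
  induction ls generalizing res cur q a with
  | nil =>
      simp only [List.foldl_nil, pvSecPairs, pvSeg, List.flatMap_nil, List.append_nil]
      exact pvFlush_getD res cur q a sec
  | cons l ls ih =>
      simp only [List.foldl_cons]
      by_cases h1 : pvSections.any
          (fun sec => PySem.Str.startswith (PySem.Str.lower l) (PySem.Str.lower sec)) = true
      · -- header line
        obtain ⟨s0, hs0⟩ : ∃ s0, pvHeaderOf l = some s0 := by
          cases hfind : pvHeaderOf l with
          | some s0 => exact ⟨s0, rfl⟩
          | none =>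
              exfalso
              simp only [pvHeaderOf, List.find?_eq_none] at hfind
              simp only [List.any_eq_true] at h1
              obtain ⟨x, hx, hpx⟩ := h1
              exact absurd hpx (by simpa using hfind x hx)
        have hstep : pvCoreA (res, cur, q, a) l = (pvFlushA res cur q a, some s0, "", "") := by
          simp only [pvCoreA]
          rw [if_pos h1]
          simp only [hs0]
        rw [hstep, ih, pvFlush_getD]
        simp only [pvSecPairs, pvSeg, hs0, List.flatMap_cons, List.append_assoc]
        simp
      · -- not a header line
        have hnone : pvHeaderOf l = none := by
          simp only [List.any_eq_true, not_exists, not_and] at h1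
          simp only [pvHeaderOf, List.find?_eq_none]
          intro x hx
          simpa using h1 x hx
        have hseg : pvSeg (l :: ls) = (l :: (pvSeg ls).1, (pvSeg ls).2) := by
          simp [pvSeg, hnone]
        by_cases h2 : (PySem.Str.startswith (PySem.Str.lower l) "q" && PySem.Str.isIn ":" l) = true
        · -- question line
          have hstep : pvCoreA (res, cur, q, a) l
              = (pvFlushA res cur q a, cur, PySem.Str.strip (pvAfterColon l), "") := by
            simp only [pvCoreA]
            rw [if_neg h1, if_pos h2]
          have hbp : pvBParseStep (q, a, []) l
              = (PySem.Str.strip (pvAfterColon l), "",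
                 (if q = "" then [] else [(PySem.Str.strip q, PySem.Str.strip a)])) := by
            simp only [pvBParseStep]
            rw [if_pos h2]
            simp
          rw [hstep, ih, pvFlush_getD]
          by_cases hcur : cur = some sec
          · simp only [pvSecPairs, hseg, hcur, if_pos]
            rw [pvBP_cons, hbp]
            simp [pvBPFrom]
          · simp [pvSecPairs, hseg, hcur]
        · by_cases h3 : (PySem.Str.startswith (PySem.Str.lower l) "answer" && PySem.Str.isIn ":" l) = true
          · -- answer line
            have hstep : pvCoreA (res, cur, q, a) l
                = (res, cur, q, PySem.Str.strip (pvAfterColon l)) := by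
              simp only [pvCoreA]
              rw [if_neg h1, if_neg h2, if_pos h3]
            have hbp : pvBParseStep (q, a, []) l
                = (q, PySem.Str.strip (pvAfterColon l), []) := by
              simp only [pvBParseStep]
              rw [if_neg h2, if_pos h3]
            rw [hstep, ih]
            by_cases hcur : cur = some sec
            · simp only [pvSecPairs, hseg, hcur, if_pos]
              rw [pvBP_cons, hbp]
              simp [pvBPFrom]
            · simp [pvSecPairs, hseg, hcur]
          · by_cases h4 : a ≠ ""
            · -- continuation appended to answer
              have hstep : pvCoreA (res, cur, q, a) l = (res, cur, q, a ++ " " ++ l) := by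
                simp only [pvCoreA]
                rw [if_neg h1, if_neg h2, if_neg h3, if_pos h4]
              have hbp : pvBParseStep (q, a, []) l = (q, a ++ " " ++ l, []) := by
                simp only [pvBParseStep]
                rw [if_neg h2, if_neg h3, if_pos h4]
              rw [hstep, ih]
              by_cases hcur : cur = some sec
              · simp only [pvSecPairs, hseg, hcur, if_pos]
                rw [pvBP_cons, hbp]
                simp [pvBPFrom]
              · simp [pvSecPairs, hseg, hcur]
            · by_cases h5 : q ≠ ""
              · -- continuation appended to question
                have hstep : pvCoreA (res, cur, q, a) l = (res, cur, q ++ " " ++ l, a) := by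
                  simp only [pvCoreA]
                  rw [if_neg h1, if_neg h2, if_neg h3, if_neg h4, if_pos h5]
                have hbp : pvBParseStep (q, a, []) l = (q ++ " " ++ l, a, []) := by
                  simp only [pvBParseStep]
                  rw [if_neg h2, if_neg h3, if_neg h4, if_pos h5]
                rw [hstep, ih]
                by_cases hcur : cur = some sec
                · simp only [pvSecPairs, hseg, hcur, if_pos]
                  rw [pvBP_cons, hbp]
                  simp [pvBPFrom]
                · simp [pvSecPairs, hseg, hcur]
              · -- dropped continuation line
                have hstep : pvCoreA (res, cur, q, a) l = (res, cur, q, a) := by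
                  simp only [pvCoreA]
                  rw [if_neg h1, if_neg h2, if_neg h3, if_neg h4, if_neg h5]
                have hbp : pvBParseStep (q, a, []) l = (q, a, []) := by
                  simp only [pvBParseStep]
                  rw [if_neg h2, if_neg h3, if_neg h4, if_neg h5]
                rw [hstep, ih]
                by_cases hcur : cur = some sec
                · simp only [pvSecPairs, hseg, hcur, if_pos]
                  rw [pvBP_cons, hbp]
                  simp [pvBPFrom]
                · simp [pvSecPairs, hseg, hcur]

-- B's first pass computes pvSeg
lemma pvB1 (ls : List String) (blocks : List (Option String × List String)) (tag : Option String) (cur : List String) :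
    ((ls.foldl pvBlockStep (blocks, tag, cur)).1
        ++ [((ls.foldl pvBlockStep (blocks, tag, cur)).2.1, (ls.foldl pvBlockStep (blocks, tag, cur)).2.2)])
      = blocks ++ (tag, cur ++ (pvSeg ls).1) :: (pvSeg ls).2.map (fun b => (some b.1, b.2)) := by
  induction ls generalizing blocks tag cur with
  | nil => simp [pvSeg]
  | cons l ls ih =>
      cases h : pvHeaderOf l with
      | some s =>
          simp only [List.foldl_cons, pvBlockStep, h, pvSeg]
          rw [ih]
          simp
      | none =>
          simp only [List.foldl_cons, pvBlockStep, h, pvSeg]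
          rw [ih]
          simp

-- B's filtered event list per section
lemma pvB2 (l : List (String × List String)) (sec : String) :
    ((((l.map (fun b => ((some b.1 : Option String), b.2))).flatMap (fun b => match b.1 with
        | some t => (pvParseBlock b.2).map (fun p => (t, p))
        | none => [])).filter (fun tp => tp.1 == sec)).map (·.2))
      = l.flatMap (fun b => if b.1 = sec then pvBPFrom "" "" b.2 else []) := by
  induction l with
  | nil => simp
  | cons b l ih =>
      obtain ⟨s, bl⟩ := b
      simp only [List.map_cons, List.flatMap_cons, List.filter_append, List.map_append]
      rw [ih]
      congr 1
      have hpb : pvParseBlock bl = pvBPFrom "" "" bl := rfl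
      by_cases hs : s = sec
      · subst hs
        simp [List.filter_map, Function.comp_def, List.map_map, hpb]
      · simp [List.filter_map, Function.comp_def, hs, hpb]

lemma pvPadLoop_eq (xs : List (String × String)) (e : Int) :
    pvPadLoop xs e = xs ++ List.replicate ((e - (xs.length : Int)).toNat) pvPad := by
  induction xs using pvPadLoop.induct (expected := e) with
  | case1 xs h ih =>
      rw [pvPadLoop, if_pos h, ih]
      have h2 : (e - (xs.length : Int)).toNat = (e - ((xs ++ [pvPad]).length : Int)).toNat + 1 := by
        simp; omega
      rw [h2]
      simp [List.replicate_succ]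
  | case2 xs h =>
      rw [pvPadLoop, if_neg h]
      have h2 : (e - (xs.length : Int)).toNat = 0 := by omega
      simp [h2]

-- keys invariant
lemma pvKeys_insert_of_mem (d : pvRes) (k : String) (v : List (String × String)) (h : k ∈ d.keys) :
    (d.insert k v).keys = d.keys := by
  have hc : d.contains k = true := by
    simp only [PySem.Dict.keys, List.mem_map] at h
    obtain ⟨p, hp, hpk⟩ := h
    simp only [PySem.Dict.contains, List.any_eq_true]
    exact ⟨p, hp, by simp [hpk]⟩
  simp only [PySem.Dict.insert, hc, if_pos, PySem.Dict.keys, List.map_map]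
  apply List.map_congr_left
  intro p hp
  by_cases hpk : p.1 = k <;> simp [hpk]

def pvCurOK (cur : Option String) : Prop := ∀ s, cur = some s → s ∈ pvSections

lemma pvKeys_flush (res : pvRes) (cur : Option String) (q a : String)
    (hk : res.keys = pvSections) (hc : pvCurOK cur) :
    (pvFlushA res cur q a).keys = pvSections := by
  cases cur with
  | none => simpa [pvFlushA] using hk
  | some s =>
      by_cases hq : q = ""
      · simpa [pvFlushA, hq] using hk
      · have hs : s ∈ pvSections := hc s rfl
        simp only [pvFlushA, hq, PySem.Dict.modify, if_false]
        rw [pvKeys_insert_of_mem _ _ _ (by rw [hk]; exact hs)]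
        simpa using hk

lemma pvKeys_fold (ls : List String) (res : pvRes) (cur : Option String) (q a : String)
    (hk : res.keys = pvSections) (hc : pvCurOK cur) :
    (ls.foldl pvCoreA (res, cur, q, a)).1.keys = pvSections
      ∧ pvCurOK (ls.foldl pvCoreA (res, cur, q, a)).2.1 := by
  induction ls generalizing res cur q a with
  | nil => exact ⟨hk, hc⟩
  | cons l ls ih =>
      have hstep : (pvCoreA (res, cur, q, a) l).1.keys = pvSections
          ∧ pvCurOK (pvCoreA (res, cur, q, a) l).2.1 := by
        simp only [pvCoreA]
        split_ifs with h1 h2 h3 h4 h5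
        · refine ⟨pvKeys_flush res cur q a hk hc, ?_⟩
          cases h : pvHeaderOf l with
          | some s =>
              intro s' hs'
              cases hs'
              exact List.mem_of_find?_eq_some h
          | none => simpa using hc
        · exact ⟨pvKeys_flush res cur q a hk hc, hc⟩
        · exact ⟨hk, hc⟩
        · exact ⟨hk, hc⟩
        · exact ⟨hk, hc⟩
        · exact ⟨hk, hc⟩
      have h := ih (pvCoreA (res, cur, q, a) l).1 (pvCoreA (res, cur, q, a) l).2.1
        (pvCoreA (res, cur, q, a) l).2.2.1 (pvCoreA (res, cur, q, a) l).2.2.2 hstep.1 hstep.2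
      simp only [Prod.mk.eta] at h
      simpa only [List.foldl_cons] using h

-- the final truncate/pad loop of A, for any dict with exactly the section keys
lemma pvFinal (R : pvRes) (per rem : Int) (hk : R.keys = pvSections) :
    ((PySem.List.enumerate pvSections).foldl (fun (result : pvRes) (p : Int × String) =>
        result.insert p.2 (pvPadLoop
          (PySem.List.slice (result.getD p.2 []) none
            (some (per + (if p.1 = (pvSections.length : Int) - 1 ∧ rem ≠ 0 then 1 else 0))))
          (per + (if p.1 = (pvSections.length : Int) - 1 ∧ rem ≠ 0 then 1 else 0)))) R).items
      = (PySem.List.enumerate pvSections).map (fun p =>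
          (p.2, pvFit (R.getD p.2 [])
                (per + (if p.1 = (pvSections.length : Int) - 1 ∧ rem ≠ 0 then 1 else 0)))) := by
  have hnd : R.keys.Nodup := by rw [hk]; decide
  have hitems := PySem.Dict.items_eq_map_keys R hnd []
  rw [hk] at hitems
  have hR : R = PySem.Dict.mk [("Technical", R.getD "Technical" []), ("HR", R.getD "HR" []),
      ("Scenario-Based", R.getD "Scenario-Based" []), ("Aptitude", R.getD "Aptitude" [])] := by
    apply PySem.Dict.ext
    rw [hitems]
    simp [pvSections]
  rw [hR]
  rw [show PySem.List.enumerate pvSections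
      = [(0, "Technical"), (1, "HR"), (2, "Scenario-Based"), (3, "Aptitude")] from by decide]
  have hfit : ∀ (xs : List (String × String)) (e : Int),
      pvPadLoop (PySem.List.slice xs none (some e)) e = pvFit xs e := by
    intro xs e
    rw [pvPadLoop_eq]
    rfl
  simp [hfit, PySem.Dict.getD, PySem.Dict.get?, PySem.Dict.insert, PySem.Dict.contains,
    pvSections, List.find?]

lemma pvGetD_nil (its : List (String × List (String × String)))
    (h : ∀ p ∈ its, p.2 = ([] : List (String × String))) (sec : String) :
    (PySem.Dict.mk its).getD sec [] = [] := by
  simp only [PySem.Dict.getD, PySem.Dict.get?]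
  cases hf : List.find? (fun p => p.1 == sec) (PySem.Dict.mk its).items with
  | none => rfl
  | some pr => simp [h pr (List.mem_of_find?_eq_some hf)]

-- ===== VERDICT (by name: the statement is the Claim_ definition above) =====
theorem parse_gemini_output_spec : Claim_equal_parse_gemini_output := by
  intro text tq _
  show parse_gemini_output text tq = parse_gemini_output_alt text tq
  simp only [parse_gemini_output, parse_gemini_output_alt]
  rw [pvStrip_fold]
  set L := List.filter (fun l => l != "") (List.map PySem.Str.strip (PySem.Str.splitlines text)) with hLdef
  set res0 := List.foldl (fun d sec => PySem.Dict.insert d sec []) PySem.Dict.empty pvSections with hres0def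
  set st := List.foldl pvCoreA (res0, none, "", "") L with hstdef
  set stB := List.foldl pvBlockStep ([], none, []) L with hstBdef
  have hcur0 : pvCurOK none := fun s h => nomatch h
  have hres0keys : res0.keys = pvSections := by rw [hres0def]; decide
  have hd0 : res0 = PySem.Dict.mk [("Technical", []), ("HR", []), ("Scenario-Based", []),
      ("Aptitude", [])] := by rw [hres0def]; rfl
  have hkR : (pvFlushA st.1 st.2.1 st.2.2.1 st.2.2.2).keys = pvSections := by
    rw [hstdef]
    exact pvKeys_flush _ _ _ _ (pvKeys_fold L res0 none "" "" hres0keys hcur0).1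
      (pvKeys_fold L res0 none "" "" hres0keys hcur0).2
  have hgetD : ∀ sec : String, (pvFlushA st.1 st.2.1 st.2.2.1 st.2.2.2).getD sec []
      = pvSecPairs sec none "" "" L := by
    intro sec
    rw [hstdef, pvA1, hd0, pvGetD_nil _ (by simp)]
    simp
  rw [pvFinal _ _ _ hkR]
  rw [show stB.1 ++ [(stB.2.1, stB.2.2)]
      = [] ++ ((none : Option String), [] ++ (pvSeg L).1) :: (pvSeg L).2.map (fun b => (some b.1, b.2))
      from by rw [hstBdef]; exact pvB1 L [] none []]
  apply List.map_congr_left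
  intro p _hp
  rw [hgetD p.2]
  simp only [List.nil_append, List.flatMap_cons]
  rw [pvB2 (pvSeg L).2 p.2]
  simp [pvSecPairs]
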